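-- pv_equiv track=rewrite | github.com/2tbmz9y2xt-lang/rubin-formal | tools/check_formal_registry_truth.py | strip_lean_comments
-- ===== SOURCE A (Python) =====
-- def _consume_string(text: str, i: int, out: list[str]) -> int:
--     out.append(text[i])
--     i += 1
--     while i < len(text):
--         ch = text[i]
--         out.append(ch)
--         if ch == "\\" and i + 1 < len(text):
--             out.append(text[i + 1])
--             i += 2
--             continue
--         i += 1
--         if ch == "\"":
--             break
--     return i
--
-- def _consume_line_comment(text: str, i: int, out: list[str]) -> int:
--     while i < len(text) and text[i] != "\n":
--         out.append(" ")
--         i += 1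
--     if i < len(text):
--         out.append("\n")
--         i += 1
--     return i
--
-- def _comment_pair_delta(text: str, i: int) -> int:
--     nxt = text[i + 1] if i + 1 < len(text) else ""
--     if text[i] == "/" and nxt == "-":
--         return 1
--     if text[i] == "-" and nxt == "/":
--         return -1
--     return 0
--
-- def _consume_block_comment(text: str, i: int, out: list[str]) -> int:
--     depth = 1
--     while i < len(text) and depth > 0:
--         delta = _comment_pair_delta(text, i)
--         if delta:
--             out.extend((" ", " "))
--             depth += delta
--             i += 2
--             continue
--         out.append("\n" if text[i] == "\n" else " ")
--         i += 1
--     return i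
--
-- def strip_lean_comments(text: str) -> str:
--     out: list[str] = []
--     i = 0
--
--     while i < len(text):
--         ch = text[i]
--         nxt = text[i + 1] if i + 1 < len(text) else ""
--
--         if ch == "\"":
--             i = _consume_string(text, i, out)
--             continue
--         if ch == "-" and nxt == "-":
--             out.extend((" ", " "))
--             i = _consume_line_comment(text, i + 2, out)
--             continue
--         if ch == "/" and nxt == "-":
--             out.extend((" ", " "))
--             i = _consume_block_comment(text, i + 2, out)
--             continue
--
--         out.append(ch)
--         i += 1
--
--     return "".join(out)
-- ===== SOURCE B (Python) =====
-- # B: one flat while-loop state machine (NORMAL / STRING / BLOCK / LINE) instead of A's helper functions.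
-- def strip_lean_comments(text: str) -> str:
--     NORMAL, STRING, BLOCK, LINE = 0, 1, 2, 3
--     out = []
--     state = NORMAL
--     depth = 0
--     i, n = 0, len(text)
--     while i < n:
--         ch = text[i]
--         if state == NORMAL:
--             if ch == '"':
--                 out.append(ch)
--                 state = STRING
--                 i += 1
--             elif ch == '-' and text[i:i + 2] == '--':
--                 out.append('  ')
--                 state = LINE
--                 i += 2
--             elif ch == '/' and text[i:i + 2] == '/-':
--                 out.append('  ')
--                 state = BLOCK
--                 depth = 1
--                 i += 2
--             else:
--                 out.append(ch)
--                 i += 1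
--         elif state == STRING:
--             if ch == '\\' and i + 1 < n:
--                 out.append(text[i:i + 2])
--                 i += 2
--             else:
--                 out.append(ch)
--                 if ch == '"':
--                     state = NORMAL
--                 i += 1
--         elif state == BLOCK:
--             two = text[i:i + 2]
--             if two == '/-':
--                 out.append('  ')
--                 depth += 1
--                 i += 2
--             elif two == '-/':
--                 out.append('  ')
--                 depth -= 1
--                 if depth == 0:
--                     state = NORMAL
--                 i += 2
--             else:
--                 out.append('\n' if ch == '\n' else ' ')
--                 i += 1
--         else:  # LINE
--             if ch == '\n':
--                 out.append('\n')
--                 state = NORMAL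
--             else:
--                 out.append(' ')
--             i += 1
--     return ''.join(out)
-- ===== Notes on version B (the rewrite author's own statement) =====
-- stated objective: alternative
-- what changed: Replaces A's four helper functions (each with its own inner while loop and per-character function dispatch) by one flat single-pass state machine over an index with an explicit state (NORMAL/STRING/BLOCK/LINE) and a block-comment depth counter.
import Mathlib
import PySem

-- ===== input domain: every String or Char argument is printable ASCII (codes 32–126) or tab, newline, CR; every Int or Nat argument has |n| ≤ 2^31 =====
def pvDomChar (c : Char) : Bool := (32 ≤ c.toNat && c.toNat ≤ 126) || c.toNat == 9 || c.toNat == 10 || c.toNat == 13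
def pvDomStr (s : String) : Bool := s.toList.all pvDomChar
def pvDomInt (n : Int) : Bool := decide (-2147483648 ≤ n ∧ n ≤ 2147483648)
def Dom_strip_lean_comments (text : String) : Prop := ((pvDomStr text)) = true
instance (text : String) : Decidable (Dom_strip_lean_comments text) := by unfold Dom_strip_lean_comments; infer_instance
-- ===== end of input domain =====

-- B replaces A's four helper functions by one flat state-machine loop (NORMAL/STRING/BLOCK/LINE); objective: alternative decomposition, same cost.

-- ===== PORT A =====
-- _consume_string: the loop after the opening quote was emitted; returns (emitted chars, rest of text)
def aStr : List Char → List Char × List Char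
  | [] => ([], [])
  | c :: rest =>
      if c = '\\' then
        match rest with
        | d :: rest' => let p := aStr rest'; (c :: d :: p.1, p.2)
        | [] => ([c], [])
      else if c = '"' then ([c], rest)
      else let p := aStr rest; (c :: p.1, p.2)

-- _consume_line_comment
def aLine : List Char → List Char × List Char
  | [] => ([], [])
  | c :: rest =>
      if c = '\n' then (['\n'], rest)
      else let p := aLine rest; (' ' :: p.1, p.2)

-- _consume_block_comment (depth as parameter; _comment_pair_delta's two checks are the two pair patterns, in its order)
def aBlock : Nat → List Char → List Char × List Char
  | 0, l => ([], l)
  | _ + 1, [] => ([], [])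
  | d + 1, '/' :: '-' :: rest => let p := aBlock (d + 2) rest; (' ' :: ' ' :: p.1, p.2)
  | d + 1, '-' :: '/' :: rest => let p := aBlock d rest; (' ' :: ' ' :: p.1, p.2)
  | d + 1, c :: rest => let p := aBlock (d + 1) rest; ((if c = '\n' then '\n' else ' ') :: p.1, p.2)

theorem aStr_len : ∀ l : List Char, (aStr l).2.length ≤ l.length := by
  intro l
  induction l using aStr.induct with
  | case1 => simp [aStr]
  | case2 d rest' ih => simp [aStr]; omega
  | case3 => simp [aStr]
  | case4 rest h => rw [aStr.eq_def]; simp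
  | case5 c rest h1 h2 ih => rw [aStr.eq_def]; simp [h1, h2]; omega

theorem aLine_len : ∀ l : List Char, (aLine l).2.length ≤ l.length := by
  intro l
  induction l using aLine.induct with
  | case1 => simp [aLine]
  | case2 rest => simp [aLine]
  | case3 c rest h ih => simp [aLine, h]; omega

theorem aBlock_len : ∀ (d : Nat) (l : List Char), (aBlock d l).2.length ≤ l.length := by
  intro d l
  induction d, l using aBlock.induct with
  | case1 l => simp [aBlock]
  | case2 n => simp [aBlock]
  | case3 d rest ih => simp [aBlock]; omega
  | case4 d rest ih => simp [aBlock]; omega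
  | case5 d c rest h1 h2 ih =>
      rw [aBlock.eq_def]
      split
      case h_3 =>
        rename_i d2 rest2 heqd heql
        simp only [List.cons.injEq] at heql
        exact (h1 _ heql.1 heql.2).elim
      case h_4 =>
        rename_i d2 rest2 heqd heql
        simp only [List.cons.injEq] at heql
        exact (h2 _ heql.1 heql.2).elim
      case h_1 => omega
      case h_2 => simp
      case h_5 =>
        rename_i c2 rest2 hne1 hne2 d2 heqd heql
        simp only [List.cons.injEq] at heql
        obtain ⟨hc, hr⟩ := heql
        subst hc; subst hr
        simp only [Nat.succ.injEq] at heqd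
        subst heqd
        simpa using Nat.le_succ_of_le ih

-- strip_lean_comments main loop (tail_length_le is cited by its termination proof)
theorem tail_length_le (l : List Char) : l.tail.length ≤ l.length := by cases l <;> simp

def aMain : List Char → List Char
  | [] => []
  | c :: rest =>
      if c = '"' then
        let p := aStr rest; c :: (p.1 ++ aMain p.2)
      else if c = '-' ∧ rest.head? = some '-' then
        let p := aLine rest.tail; ' ' :: ' ' :: (p.1 ++ aMain p.2)
      else if c = '/' ∧ rest.head? = some '-' then
        let p := aBlock 1 rest.tail; ' ' :: ' ' :: (p.1 ++ aMain p.2)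
      else c :: aMain rest
termination_by l => l.length
decreasing_by
  · simpa using Nat.lt_succ_of_le (aStr_len rest)
  · simpa using Nat.lt_succ_of_le (le_trans (aLine_len rest.tail) (tail_length_le rest))
  · simpa using Nat.lt_succ_of_le (le_trans (aBlock_len 1 rest.tail) (tail_length_le rest))
  · simpa using Nat.lt_succ_self rest.length

def strip_lean_comments (text : String) : String := String.mk (aMain text.toList)

-- ===== PORT B =====
-- one flat state machine: state 0 = NORMAL, 1 = STRING, 2 = BLOCK (with its depth counter), 3 = LINE;
-- the if/elif branches of Source B's single loop are the match arms, in Source B's order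
def bLoop : Nat → Nat → List Char → List Char
  | _, _, [] => []
  | 0, _, '"' :: rest => '"' :: bLoop 1 0 rest
  | 0, _, '-' :: '-' :: rest => ' ' :: ' ' :: bLoop 3 0 rest
  | 0, _, '/' :: '-' :: rest => ' ' :: ' ' :: bLoop 2 1 rest
  | 0, _, c :: rest => c :: bLoop 0 0 rest
  | 1, _, '\\' :: d :: rest => '\\' :: d :: bLoop 1 0 rest
  | 1, _, '"' :: rest => '"' :: bLoop 0 0 rest
  | 1, _, c :: rest => c :: bLoop 1 0 rest
  | 2, depth, '/' :: '-' :: rest => ' ' :: ' ' :: bLoop 2 (depth + 1) rest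
  | 2, depth, '-' :: '/' :: rest => ' ' :: ' ' :: bLoop (if depth = 1 then 0 else 2) (depth - 1) rest
  | 2, depth, c :: rest => (if c = '\n' then '\n' else ' ') :: bLoop 2 depth rest
  | _, _, '\n' :: rest => '\n' :: bLoop 0 0 rest
  | _, _, _ :: rest => ' ' :: bLoop 3 0 rest

def strip_lean_comments_alt (text : String) : String := String.mk (bLoop 0 0 text.toList)

-- ===== PRECONDITION & SPEC =====
def Spec_strip_lean_comments (text : String) (out : String) : Prop := out = strip_lean_comments_alt text
instance (text : String) (out : String) : Decidable (Spec_strip_lean_comments text out) := by unfold Spec_strip_lean_comments; infer_instance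

-- ===== CLAIM (what is proved, stated in full; the proofs are below) =====
def Claim_equal_strip_lean_comments : Prop := ∀ (text : String), Dom_strip_lean_comments text → Spec_strip_lean_comments text (strip_lean_comments text)

-- ===== LEMMAS AND PROOFS =====

theorem bLoop_string (l : List Char) :
    bLoop 1 0 l = (aStr l).1 ++ bLoop 0 0 (aStr l).2 := by
  induction l using aStr.induct with
  | case1 => simp [aStr, bLoop]
  | case2 d rest' ih => rw [aStr.eq_def]; simp [bLoop, ih]
  | case3 => rw [aStr.eq_def]; simp [bLoop]
  | case4 rest h => rw [aStr.eq_def]; simp [bLoop]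
  | case5 c rest h1 h2 ih =>
      rw [aStr.eq_def]
      simp only [h1, h2, if_neg, not_false_iff]
      rw [bLoop.eq_def]
      split
      all_goals try (rename_i heq1 heq2 heq3; first | omega | (simp_all))

theorem bLoop_line (l : List Char) :
    bLoop 3 0 l = (aLine l).1 ++ bLoop 0 0 (aLine l).2 := by
  induction l using aLine.induct with
  | case1 => simp [aLine, bLoop]
  | case2 rest => rw [aLine.eq_def]; simp [bLoop]
  | case3 c rest h ih =>
      rw [aLine.eq_def]
      simp only [h, if_neg, not_false_iff]
      rw [bLoop.eq_def]
      split
      all_goals try (rename_i heq1 heq2 heq3; first | omega | (simp_all))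

theorem bLoop_block : ∀ (d : Nat) (l : List Char), 1 ≤ d →
    bLoop 2 d l = (aBlock d l).1 ++ bLoop 0 0 (aBlock d l).2 := by
  intro d l
  induction d, l using aBlock.induct with
  | case1 l => intro h; omega
  | case2 n => intro _; simp [aBlock, bLoop]
  | case3 d rest ih =>
      intro _
      rw [aBlock.eq_def]
      simp [bLoop, ih (by omega)]
  | case4 d rest ih =>
      intro _
      rw [aBlock.eq_def]
      cases d with
      | zero => simp [bLoop, aBlock]
      | succ d' =>
          have hne : ¬ (d' + 1 + 1 = 1) := by omega
          simp [bLoop, hne, ih (by omega)]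
  | case5 d c rest h1 h2 ih =>
      intro _
      rw [aBlock.eq_def]
      rw [bLoop.eq_def]
      split
      all_goals try (rename_i heq1 heq2 heq3; first | omega | (simp_all))

theorem bLoop_main : ∀ (n : Nat) (l : List Char), l.length ≤ n → bLoop 0 0 l = aMain l := by
  intro n
  induction n with
  | zero =>
      intro l hl
      have : l = [] := by cases l <;> simp_all
      subst this; simp [bLoop, aMain]
  | succ n ih =>
      intro l hl
      cases l with
      | nil => simp [bLoop, aMain]
      | cons c rest =>
          rw [aMain]
          rw [bLoop.eq_def]
          split
          all_goals try (rename_i heq1 heq2 heq3; first | omega | (simp_all))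
          case h_2 =>
            rw [bLoop_string, ih _ (le_trans (aStr_len heq1) hl)]
          case h_3 =>
            rw [bLoop_line, ih _ (by have := aLine_len heq1; omega)]
          case h_4 =>
            rw [bLoop_block 1 heq1 (by omega), ih _ (by have := aBlock_len 1 heq1; omega)]
          case h_5 =>
            rename_i hq hneDash
            obtain ⟨hc, hr⟩ := heq3
            subst hc; subst hr
            have hA : ¬(c = '-' ∧ rest.head? = some '-') := by
              rintro ⟨g1, g2⟩
              cases rest with
              | nil => simp at g2
              | cons r rs => simp at g2; exact hneDash rs g1 (by simp [g2])
            have hB : ¬(c = '/' ∧ rest.head? = some '-') := by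
              rintro ⟨g1, g2⟩
              cases rest with
              | nil => simp at g2
              | cons r rs => simp at g2; exact heq1 rs g1 (by simp [g2])
            simp [hA, hB]

-- ===== VERDICT (by name: the statement is the Claim_ definition above) =====
theorem strip_lean_comments_spec : Claim_equal_strip_lean_comments := by
  intro text _
  unfold Spec_strip_lean_comments strip_lean_comments strip_lean_comments_alt
  rw [bLoop_main text.toList.length text.toList le_rfl]
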